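-- pv_equiv track=rewrite | github.com/cernael/advent_of_code_2021 | cernael-python/25a.py | move_south
-- ===== SOURCE A (Python) =====
-- def move_south(map):
--     moved = False
--     for j in range(len(map[0])):
--         skip = False
--         wrap = map[0][j] == '.'
--         for i in range(len(map) - 1):
--             if map[i][j] == 'v' and map[i+1][j] == '.' and not skip:
--                 map[i][j] = '.'
--                 map[i+1][j] = 'v'
--                 skip = True
--                 moved = True
--             else:
--                 skip = False
--         if wrap and map[-1][j] == 'v' and not skip:
--             map[0][j] = 'v'
--             map[-1][j] = '.'
--             moved = True
--     return map, moved
-- ===== SOURCE B (Python) =====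
-- def move_south(map):
--     # Two-phase step: read-only scan of the whole grid collects every mover,
--     # then all moves are applied at once (same in-place mutation of `map` as A).
--     n = len(map)
--     cols = len(map[0])
--     moves = [(i, j) for j in range(cols) for i in range(n)
--              if map[i][j] == 'v' and map[(i + 1) % n][j] == '.']
--     for i, j in moves:
--         map[i][j] = '.'
--         map[(i + 1) % n][j] = 'v'
--     return map, bool(moves)
-- ===== Notes on version B (the rewrite author's own statement) =====
-- stated objective: alternative
-- what changed: A interleaves reads and in-place writes per column with a skip flag to fake simultaneity; B does a read-only pass over the pre-move grid collecting all movers (with modular wrap) and then applies them in a second pass, so the skip machinery and the separate wrap branch disappear.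
-- outside the precondition, e.g. on move_south([['x', 'y'], ['x']]): A returns ([['x', 'y'], ['x']], False), B raises IndexError
import Mathlib
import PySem

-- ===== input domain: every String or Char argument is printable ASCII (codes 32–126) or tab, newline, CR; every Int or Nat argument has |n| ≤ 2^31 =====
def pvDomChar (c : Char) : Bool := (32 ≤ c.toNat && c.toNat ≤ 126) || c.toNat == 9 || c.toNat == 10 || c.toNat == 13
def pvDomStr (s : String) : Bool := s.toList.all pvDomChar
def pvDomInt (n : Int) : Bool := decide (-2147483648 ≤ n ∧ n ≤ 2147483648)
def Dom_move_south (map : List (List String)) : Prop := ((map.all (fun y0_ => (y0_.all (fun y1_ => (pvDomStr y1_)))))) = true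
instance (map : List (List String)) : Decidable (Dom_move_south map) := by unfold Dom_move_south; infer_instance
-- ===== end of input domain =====

-- B replaces A's interleaved read/write column scan (skip flag + separate wrap branch) by a
-- read-only pass collecting all movers from the pre-move grid and a second pass applying them;
-- same return value and the same final in-place mutation of `map`.

-- ===== PORT A =====
-- inner 'for i in range(len(map)-1)' body; state = (map, skip, moved)
def innerStepA (j : Int) (s : List (List String) × Bool × Bool) (i : Int) :
    List (List String) × Bool × Bool :=
  let m := s.1
  if (PySem.List.pyGetD (PySem.List.pyGetD m i []) j "" == "v") &&
     (PySem.List.pyGetD (PySem.List.pyGetD m (i + 1) []) j "" == ".") && !s.2.1 then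
    let m1 := PySem.List.pySetD m i (PySem.List.pySetD (PySem.List.pyGetD m i []) j ".")
    let m2 := PySem.List.pySetD m1 (i + 1) (PySem.List.pySetD (PySem.List.pyGetD m1 (i + 1) []) j "v")
    (m2, true, true)
  else (m, false, s.2.2)

-- one iteration of 'for j in range(len(map[0]))'; state = (map, moved)
def colStepA (st : List (List String) × Bool) (j : Int) : List (List String) × Bool :=
  let m := st.1
  let wrap := PySem.List.pyGetD (PySem.List.pyGetD m 0 []) j "" == "."
  let r := (PySem.List.pyRange 0 (PySem.List.len m - 1) 1).foldl (innerStepA j) (m, false, st.2)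
  let m' := r.1
  if wrap && (PySem.List.pyGetD (PySem.List.pyGetD m' (-1) []) j "" == "v") && !r.2.1 then
    let m1 := PySem.List.pySetD m' 0 (PySem.List.pySetD (PySem.List.pyGetD m' 0 []) j "v")
    let m2 := PySem.List.pySetD m1 (-1) (PySem.List.pySetD (PySem.List.pyGetD m1 (-1) []) j ".")
    (m2, true)
  else (m', r.2.2)

def move_south (map : List (List String)) : List (List String) × Bool :=
  (PySem.List.pyRange 0 (PySem.List.len (PySem.List.pyGetD map 0 [])) 1).foldl
    colStepA (map, false)

-- ===== PORT B =====
-- apply one recorded move (i, j): source (i,j) := '.', target ((i+1)%n, j) := 'v'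
def moveB (n : Int) (m : List (List String)) (p : Int × Int) : List (List String) :=
  let m1 := PySem.List.pySetD m p.1 (PySem.List.pySetD (PySem.List.pyGetD m p.1 []) p.2 ".")
  PySem.List.pySetD m1 (PySem.Int.mod (p.1 + 1) n)
    (PySem.List.pySetD (PySem.List.pyGetD m1 (PySem.Int.mod (p.1 + 1) n) []) p.2 "v")

def move_south_alt (map : List (List String)) : List (List String) × Bool :=
  let n := PySem.List.len map
  let cols := PySem.List.len (PySem.List.pyGetD map 0 [])
  let moves := (PySem.List.pyRange 0 cols 1).flatMap (fun j =>
    (PySem.List.pyRange 0 n 1).filterMap (fun i =>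
      if (PySem.List.pyGetD (PySem.List.pyGetD map i []) j "" == "v") &&
         (PySem.List.pyGetD (PySem.List.pyGetD map (PySem.Int.mod (i + 1) n) []) j "" == ".")
      then some (i, j) else none))
  (moves.foldl (moveB n) map, !moves.isEmpty)

-- ===== PRECONDITION & SPEC =====
-- Pre_ excludes the empty grid and ragged grids having a row shorter than row 0, on which A's
-- nested indexing raises IndexError (except for rare value-dependent cases where the short cells
-- are never reached because the 'and' short-circuits; those are excluded too, see cites).
def Pre_move_south (map : List (List String)) : Prop :=
  map ≠ [] ∧ ∀ row ∈ map, (map.getD 0 []).length ≤ row.length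
instance (map : List (List String)) : Decidable (Pre_move_south map) := by
  unfold Pre_move_south; infer_instance

def pvWitness_move_south : List (List String) := [["v"], ["."]]

def Spec_move_south (map : List (List String)) (out : List (List String) × Bool) : Prop :=
  out = move_south_alt map
instance (map : List (List String)) (out : List (List String) × Bool) :
    Decidable (Spec_move_south map out) := by unfold Spec_move_south; infer_instance

-- ===== CLAIM (what is proved, stated in full; the proofs are below) =====
def Claim_equal_move_south : Prop := ∀ (map : List (List String)), Dom_move_south map →
  Pre_move_south map → Spec_move_south map (move_south map)

-- ===== LEMMAS AND PROOFS =====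

-- cell read / cell write on the grid, Nat indices
def pvG (m : List (List String)) (i j : Nat) : String := (m.getD i []).getD j ""
def pvS (m : List (List String)) (i j : Nat) (v : String) : List (List String) :=
  m.set i ((m.getD i []).set j v)
-- the mover predicate of B (modular wrap) and the inner-loop (no wrap) variant
def pvP (n : Nat) (m : List (List String)) (j i : Nat) : Bool :=
  (pvG m i j == "v") && (pvG m ((i + 1) % n) j == ".")
def pvPL (m : List (List String)) (j i : Nat) : Bool :=
  (pvG m i j == "v") && (pvG m (i + 1) j == ".")
def pvMv (n j : Nat) (m : List (List String)) (i : Nat) : List (List String) :=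
  pvS (pvS m i j ".") ((i + 1) % n) j "v"
def pvApply (n j : Nat) (L : List Nat) (m : List (List String)) : List (List String) :=
  L.foldl (pvMv n j) m
def pvMoves (n : Nat) (m : List (List String)) (j : Nat) : List Nat :=
  (List.range n).filter (pvP n m j)
-- Nat form of A's inner step
def pvStepN (j : Nat) (s : List (List String) × Bool × Bool) (i : Nat) :
    List (List String) × Bool × Bool :=
  if (pvG s.1 i j == "v") && (pvG s.1 (i + 1) j == ".") && !s.2.1
  then (pvS (pvS s.1 i j ".") (i + 1) j "v", true, true)
  else (s.1, false, s.2.2)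
def pvSkip (m : List (List String)) (j k : Nat) : Bool :=
  match k with | 0 => false | Nat.succ t => pvPL m j t

theorem length_pvS (m : List (List String)) (i j : Nat) (v : String) :
    (pvS m i j v).length = m.length := by simp [pvS]

theorem pv_getD_set_ne {α : Type} (l : List α) (n k : Nat) (u d : α) (h : k ≠ n) :
    (l.set n u).getD k d = l.getD k d := by
  simp [List.getD_eq_getElem?_getD, List.getElem?_set_ne (by omega : n ≠ k)]

theorem pvG_pvS_ne (m : List (List String)) (a b x y : Nat) (v : String)
    (h : x ≠ a ∨ y ≠ b) : pvG (pvS m a b v) x y = pvG m x y := by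
  unfold pvG pvS
  rcases h with h | h
  · rw [pv_getD_set_ne _ _ _ _ _ h]
  · by_cases hx : x = a
    · subst hx
      by_cases hl : x < m.length
      · have h1 : (m.set x ((m.getD x []).set b v)).getD x [] = (m.getD x []).set b v := by
          rw [List.getD_eq_getElem?_getD, List.getElem?_set_self hl]; rfl
        rw [h1, pv_getD_set_ne _ _ _ _ _ h]
      · rw [List.set_eq_of_length_le (by omega)]
    · rw [pv_getD_set_ne _ _ _ _ _ hx]

theorem pvS_comm (m : List (List String)) (a b c d : Nat) (v w : String) (h : a ≠ c) :
    pvS (pvS m a b v) c d w = pvS (pvS m c d w) a b v := by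
  unfold pvS
  rw [pv_getD_set_ne _ _ _ _ _ (Ne.symm h), pv_getD_set_ne _ _ _ _ _ h,
    List.set_comm _ _ h]

theorem length_pvApply (n j : Nat) (L : List Nat) (m : List (List String)) :
    (pvApply n j L m).length = m.length := by
  induction L generalizing m with
  | nil => rfl
  | cons t L ih => simp [pvApply, List.foldl_cons] at ih ⊢
                   rw [ih, pvMv, length_pvS, length_pvS]

theorem pvG_pvApply_ne_col (n j : Nat) (L : List Nat) (m : List (List String)) (x y : Nat)
    (hy : y ≠ j) : pvG (pvApply n j L m) x y = pvG m x y := by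
  induction L generalizing m with
  | nil => rfl
  | cons t L ih =>
      simp only [pvApply, List.foldl_cons] at ih ⊢
      rw [ih, pvMv, pvG_pvS_ne _ _ _ _ _ _ (Or.inr hy), pvG_pvS_ne _ _ _ _ _ _ (Or.inr hy)]

theorem pvG_pvApply_untouched (n j : Nat) (L : List Nat) (m : List (List String)) (x : Nat)
    (h : ∀ t ∈ L, t ≠ x ∧ (t + 1) % n ≠ x) : pvG (pvApply n j L m) x j = pvG m x j := by
  induction L generalizing m with
  | nil => rfl
  | cons t L ih =>
      simp only [pvApply, List.foldl_cons] at ih ⊢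
      rw [ih _ (fun t ht => h t (List.mem_cons_of_mem _ ht)), pvMv,
        pvG_pvS_ne _ _ _ _ _ _ (Or.inl (h t (List.mem_cons_self) |>.2).symm),
        pvG_pvS_ne _ _ _ _ _ _ (Or.inl (h t (List.mem_cons_self) |>.1).symm)]

theorem innerStepA_cast (j i : Nat) (s : List (List String) × Bool × Bool) :
    innerStepA (↑j) s (↑i) = pvStepN j s i := by
  unfold innerStepA pvStepN pvG pvS
  have hcast : ((i : Int) + 1) = (((i + 1 : Nat)) : Int) := by push_cast; ring
  rw [hcast]
  simp only [PySem.List.pyGetD_natCast, PySem.List.pySetD_natCast]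

theorem inner_inv (m : List (List String)) (j : Nat) (acc : Bool) :
    ∀ k, k ≤ m.length - 1 →
    (List.range k).foldl (pvStepN j) (m, false, acc)
      = (pvApply m.length j ((List.range k).filter (pvPL m j)) m,
         pvSkip m j k,
         acc || !((List.range k).filter (pvPL m j)).isEmpty) := by
  intro k
  induction k with
  | zero => intro _; simp [pvApply, pvSkip]
  | succ k ih =>
      intro hk
      have hk' : k ≤ m.length - 1 := by omega
      have hkn : k + 1 < m.length := by omega
      rw [List.range_succ, List.foldl_append, List.filter_append, ih hk']
      set M := pvApply m.length j ((List.range k).filter (pvPL m j)) m with hM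
      simp only [List.foldl_cons, List.foldl_nil]
      cases hsk : pvSkip m j k with
      | true =>
          obtain ⟨t, rfl, hPt⟩ : ∃ t, k = t + 1 ∧ pvPL m j t = true := by
            cases k with
            | zero => simp [pvSkip] at hsk
            | succ t => exact ⟨t, rfl, hsk⟩
          have hdot : pvG m (t + 1) j = "." := by
            simp only [pvPL, Bool.and_eq_true, beq_iff_eq] at hPt
            exact hPt.2
          have hPk : pvPL m j (t + 1) = false := by simp [pvPL, hdot]
          have hfil : List.filter (pvPL m j) [t + 1] = [] := by simp [hPk]
          have hskip' : pvSkip m j (t + 1 + 1) = false := hPk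
          simp only [pvStepN, Bool.not_true, Bool.and_false]
          rw [if_neg Bool.false_ne_true, hfil, List.append_nil, hskip', ← hM]
      | false =>
          have hU1 : pvG M k j = pvG m k j := by
            apply pvG_pvApply_untouched
            intro t ht
            have ht' := List.of_mem_filter ht
            have htk : t < k := List.mem_range.mp (List.mem_filter.mp ht).1
            constructor
            · omega
            · rw [Nat.mod_eq_of_lt (by omega)]
              intro hcontra
              have hcon2 : pvSkip m j k = true := by subst hcontra; exact ht'
              rw [hcon2] at hsk; exact absurd hsk (by simp)
          have hU2 : pvG M (k + 1) j = pvG m (k + 1) j := by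
            apply pvG_pvApply_untouched
            intro t ht
            have htk : t < k := List.mem_range.mp (List.mem_filter.mp ht).1
            rw [Nat.mod_eq_of_lt (by omega)]
            omega
          have hskip' : pvSkip m j (k + 1) = pvPL m j k := rfl
          simp only [pvStepN, Bool.not_false, Bool.and_true]
          rw [hU1, hU2]
          cases hP : ((pvG m k j == "v") && (pvG m (k + 1) j == ".")) with
          | true =>
              have hPk : pvPL m j k = true := hP
              have hfil : List.filter (pvPL m j) [k] = [k] := by simp [hPk]
              rw [hfil, if_pos rfl]
              have hgrid : pvApply m.length j
                  ((List.range k).filter (pvPL m j) ++ [k]) m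
                  = pvS (pvS M k j ".") (k + 1) j "v" := by
                show pvApply m.length j _ m = _
                rw [pvApply, List.foldl_append]
                change pvMv m.length j (pvApply m.length j ((List.range k).filter (pvPL m j)) m) k = _
                rw [← hM]
                unfold pvMv
                rw [Nat.mod_eq_of_lt hkn]
              rw [hgrid, hskip', hPk]
              simp
          | false =>
              have hPk : pvPL m j k = false := hP
              have hfil : List.filter (pvPL m j) [k] = [] := by simp [hPk]
              rw [hfil, List.append_nil, if_neg Bool.false_ne_true, hskip', hPk, ← hM]

theorem pvG_def (m : List (List String)) (i j : Nat) :
    (m.getD i []).getD j "" = pvG m i j := rfl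

theorem pv_pyGetD_neg_one {α : Type} (xs : List α) (d : α) (h : 1 ≤ xs.length) :
    PySem.List.pyGetD xs (-1) d = xs.getD (xs.length - 1) d := by
  simp [PySem.List.pyGetD, PySem.List.pyGet?, PySem.List.pyIdx?, h,
    List.getD_eq_getElem?_getD]

theorem pv_pySetD_neg_one {α : Type} (xs : List α) (v : α) (h : 1 ≤ xs.length) :
    PySem.List.pySetD xs (-1) v = xs.set (xs.length - 1) v := by
  simp [PySem.List.pySetD, PySem.List.pySet?, PySem.List.pyIdx?, h]

theorem pvMoves_split (m : List (List String)) (j : Nat) (hn : 1 ≤ m.length) :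
    pvMoves m.length m j
      = ((List.range (m.length - 1)).filter (pvPL m j))
        ++ (if pvP m.length m j (m.length - 1) then [m.length - 1] else []) := by
  unfold pvMoves
  rw [show List.range m.length = List.range (m.length - 1) ++ [m.length - 1] by
    rw [← List.range_succ]; congr 1; omega]
  rw [List.filter_append]
  congr 1
  · apply List.filter_congr
    intro i hi
    have hi' : i < m.length - 1 := List.mem_range.mp hi
    unfold pvP pvPL
    rw [Nat.mod_eq_of_lt (by omega)]
  · cases h2 : pvP m.length m j (m.length - 1) <;> simp [h2]

theorem colStepA_eq (m : List (List String)) (j : Nat) (acc : Bool) (hn : 1 ≤ m.length) :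
    colStepA (m, acc) (↑j)
      = (pvApply m.length j (pvMoves m.length m j) m,
         acc || !(pvMoves m.length m j).isEmpty) := by
  have hrange : PySem.List.pyRange 0 (PySem.List.len m - 1) 1
      = (List.range (m.length - 1)).map (fun k => ((k : Nat) : Int)) := by
    rw [PySem.List.len_eq, PySem.List.pyRange_one]
    rw [show (((m.length : Int)) - 1 - 0).toNat = m.length - 1 by omega]
    simp
  simp only [colStepA, PySem.List.pyGetD_zero, PySem.List.pyGetD_natCast, pvG_def]
  rw [hrange, List.foldl_map]
  rw [PySem.List.foldl_congr_mem _ _ (pvStepN j) _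
    (by intro s k _; exact innerStepA_cast j k s)]
  rw [inner_inv m j acc _ (le_refl _)]
  set L := (List.range (m.length - 1)).filter (pvPL m j) with hL
  set M := pvApply m.length j L m with hMdef
  have hlenM : M.length = m.length := length_pvApply _ _ _ _
  dsimp only
  rw [pv_pyGetD_neg_one M [] (by omega), hlenM, pvG_def]
  have hsplit := pvMoves_split m j hn
  cases hsk : pvSkip m j (m.length - 1) with
  | true =>
      obtain ⟨t, ht, hPt⟩ : ∃ t, m.length - 1 = t + 1 ∧ pvPL m j t = true := by
        cases hh : m.length - 1 with
        | zero => rw [hh] at hsk; simp [pvSkip] at hsk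
        | succ t => rw [hh] at hsk; exact ⟨t, rfl, hsk⟩
      have hdot : pvG m (m.length - 1) j = "." := by
        rw [ht]
        simp only [pvPL, Bool.and_eq_true, beq_iff_eq] at hPt
        exact hPt.2
      have hPlast : pvP m.length m j (m.length - 1) = false := by
        simp [pvP, hdot]
      rw [hsplit, hPlast, if_neg Bool.false_ne_true, List.append_nil,
        if_neg (by simp), ← hL, ← hMdef]
  | false =>
      have hU : pvG M (m.length - 1) j = pvG m (m.length - 1) j := by
        apply pvG_pvApply_untouched
        intro t htL
        have htk : t < m.length - 1 := List.mem_range.mp (List.mem_filter.mp htL).1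
        have ht' := List.of_mem_filter htL
        constructor
        · omega
        · rw [Nat.mod_eq_of_lt (by omega)]
          intro hc
          have hcon : pvSkip m j (m.length - 1) = true := by rw [← hc]; exact ht'
          rw [hcon] at hsk; exact absurd hsk (by simp)
      rw [hU]
      have hmod : (m.length - 1 + 1) % m.length = 0 := by
        rw [Nat.sub_add_cancel hn]; exact Nat.mod_self _
      cases hw : pvP m.length m j (m.length - 1) with
      | false =>
          rw [hsplit, hw, if_neg Bool.false_ne_true, List.append_nil, ← hL, ← hMdef]
          simp only [pvP, hmod] at hw
          rw [if_neg (by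
            simp only [Bool.not_false, Bool.and_true]
            intro hcontra
            rw [Bool.and_comm] at hcontra
            rw [hcontra] at hw
            exact absurd hw (by simp))]
      | true =>
          rw [hsplit, hw, if_pos rfl]
          simp only [pvP, Bool.and_eq_true, beq_iff_eq, hmod] at hw
          have h0 : pvG m 0 j = "." := hw.2
          have hvlast : pvG m (m.length - 1) j = "v" := hw.1
          have hn2 : 2 ≤ m.length := by
            by_contra hcon
            have h1 : m.length = 1 := by omega
            rw [h1] at hvlast
            simp only [Nat.sub_self] at hvlast
            rw [hvlast] at h0
            exact absurd h0 (by decide)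
          rw [if_pos (by simp [h0, hvlast])]
          -- normalise the two in-place writes of the wrap branch
          rw [show ((0:Int)) = ((0:Nat) : Int) by simp]
          rw [PySem.List.pySetD_natCast, PySem.List.pySetD_natCast]
          have hm1 : M.set 0 ((M.getD 0 []).set j "v") = pvS M 0 j "v" := rfl
          rw [hm1]
          have hlen1 : (pvS M 0 j "v").length = m.length := by
            rw [length_pvS, hlenM]
          rw [pv_pyGetD_neg_one _ [] (by rw [hlen1]; omega),
            pv_pySetD_neg_one _ _ (by rw [hlen1]; omega),
            hlen1, PySem.List.pySetD_natCast]
          have hm2 : (pvS M 0 j "v").set (m.length - 1)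
              (((pvS M 0 j "v").getD (m.length - 1) []).set j ".")
              = pvS (pvS M 0 j "v") (m.length - 1) j "." := rfl
          rw [hm2, pvS_comm _ _ _ _ _ _ _ (by omega : (0:Nat) ≠ m.length - 1)]
          have hgrid : pvApply m.length j
              ((List.range (m.length - 1)).filter (pvPL m j) ++ [m.length - 1]) m
              = pvS (pvS M (m.length - 1) j ".") ((m.length - 1 + 1) % m.length) j "v" := by
            rw [pvApply, List.foldl_append]
            change pvMv m.length j
              (pvApply m.length j ((List.range (m.length - 1)).filter (pvPL m j)) m)
              (m.length - 1) = _
            rw [← hL, ← hMdef]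
            rfl
          rw [hgrid, hmod]
          simp
theorem pv_pyRange_nat (n : Nat) :
    PySem.List.pyRange 0 ((n : Int)) 1 = (List.range n).map (fun k => ((k : Nat) : Int)) := by
  rw [PySem.List.pyRange_one, show (((n : Int)) - 0).toNat = n by omega]
  simp

theorem pvMoves_congr (n : Nat) (m m0 : List (List String)) (j : Nat)
    (h : ∀ i, pvG m i j = pvG m0 i j) : pvMoves n m j = pvMoves n m0 j := by
  unfold pvMoves
  apply List.filter_congr
  intro i _
  unfold pvP
  rw [h i, h ((i + 1) % n)]

theorem outer_inv (m0 : List (List String)) (js : List Nat) :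
    ∀ (m : List (List String)) (acc : Bool), js.Nodup → m.length = m0.length →
    1 ≤ m0.length → (∀ j ∈ js, ∀ i, pvG m i j = pvG m0 i j) →
    js.foldl (fun st (j : Nat) => colStepA st ((j : Int))) (m, acc)
      = (js.foldl (fun mm j => pvApply m0.length j (pvMoves m0.length m0 j) mm) m,
         acc || js.any (fun j => !(pvMoves m0.length m0 j).isEmpty)) := by
  induction js with
  | nil => intro m acc _ _ _ _; simp
  | cons j js ih =>
      intro m acc hnd hlen hn hagree
      simp only [List.foldl_cons, List.any_cons]
      rw [colStepA_eq m j acc (by omega)]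
      have hmv : pvMoves m.length m j = pvMoves m0.length m0 j := by
        rw [hlen]
        exact pvMoves_congr m0.length m m0 j (hagree j List.mem_cons_self)
      rw [hmv, hlen]
      rw [ih (pvApply m0.length j (pvMoves m0.length m0 j) m) _
        (List.nodup_cons.mp hnd).2 (by rw [length_pvApply, hlen]) hn ?_]
      · rw [Bool.or_assoc]
      · intro j' hj' i
        have hne : j' ≠ j := by
          rintro rfl
          exact (List.nodup_cons.mp hnd).1 hj'
        rw [pvG_pvApply_ne_col _ _ _ _ _ _ hne]
        exact hagree j' (List.mem_cons_of_mem _ hj') i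

theorem pv_foldl_flatMap {α β γ : Type} (l : List α) (g : α → List β) (f : γ → β → γ)
    (init : γ) :
    (l.flatMap g).foldl f init = l.foldl (fun a x => (g x).foldl f a) init := by
  induction l generalizing init with
  | nil => rfl
  | cons a l ih => simp [List.flatMap_cons, List.foldl_append, ih]

theorem pv_filterMap_if {α β : Type} (l : List α) (p : α → Bool) (f : α → β) :
    l.filterMap (fun x => if p x then some (f x) else none) = (l.filter p).map f := by
  induction l with
  | nil => rfl
  | cons a l ih =>
      by_cases h : p a <;> simp [h, ih]

theorem pv_isEmpty_append {α : Type} (xs ys : List α) :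
    (xs ++ ys).isEmpty = (xs.isEmpty && ys.isEmpty) := by
  cases xs <;> simp

theorem pv_not_isEmpty_flatMap {α β : Type} (l : List α) (g : α → List β) :
    (!(l.flatMap g).isEmpty) = l.any (fun x => !(g x).isEmpty) := by
  induction l with
  | nil => rfl
  | cons a l ih =>
      rw [List.flatMap_cons, List.any_cons, pv_isEmpty_append, ← ih]
      cases (g a).isEmpty <;> simp

theorem alt_eq (m0 : List (List String)) :
    move_south_alt m0
      = ((List.range (m0.getD 0 []).length).foldl
           (fun mm j => pvApply m0.length j (pvMoves m0.length m0 j) mm) m0,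
         (List.range (m0.getD 0 []).length).any
           (fun j => !(pvMoves m0.length m0 j).isEmpty)) := by
  have hstep : ∀ (j i : Nat) (mm : List (List String)),
      moveB (↑m0.length) mm ((↑i : Int), (↑j : Int)) = pvMv m0.length j mm i := by
    intro j i mm
    unfold moveB pvMv pvS
    have hc : ((i : Int) + 1) = (((i + 1 : Nat)) : Int) := by push_cast; ring
    rw [hc]
    dsimp only
    rw [PySem.Int.mod_natCast]
    simp only [PySem.List.pyGetD_natCast, PySem.List.pySetD_natCast]
  have hinner : ∀ j : Nat,
      (PySem.List.pyRange 0 (PySem.List.len m0) 1).filterMap (fun i =>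
        if (PySem.List.pyGetD (PySem.List.pyGetD m0 i []) ((j : Int)) "" == "v") &&
           (PySem.List.pyGetD (PySem.List.pyGetD m0
              (PySem.Int.mod (i + 1) (PySem.List.len m0)) []) ((j : Int)) "" == ".")
        then some (i, ((j : Int))) else none)
      = (pvMoves m0.length m0 j).map (fun (i : Nat) => ((i : Int), (j : Int))) := by
    intro j
    rw [PySem.List.len_eq, pv_pyRange_nat, List.filterMap_map]
    have hfun : ∀ i : Nat,
        (if (PySem.List.pyGetD (PySem.List.pyGetD m0 ((i : Int)) []) ((j : Int)) "" == "v") &&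
            (PySem.List.pyGetD (PySem.List.pyGetD m0
               (PySem.Int.mod ((i : Int) + 1) ((m0.length : Int))) []) ((j : Int)) "" == ".")
         then some (((i : Int)), ((j : Int))) else none)
        = (if pvP m0.length m0 j i then some (((i : Int)), ((j : Int))) else none) := by
      intro i
      rw [show ((i : Int) + 1) = (((i + 1 : Nat)) : Int) by push_cast; ring,
        PySem.Int.mod_natCast]
      simp only [PySem.List.pyGetD_natCast, pvG_def]
      rfl
    calc (List.range m0.length).filterMap _
        = (List.range m0.length).filterMap
            (fun i => if pvP m0.length m0 j i then some (((i : Int)), ((j : Int))) else none) := by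
          apply List.filterMap_congr
          intro i _
          exact hfun i
      _ = (pvMoves m0.length m0 j).map (fun (i : Nat) => ((i : Int), (j : Int))) := by
          rw [pv_filterMap_if]
          rfl
  have hcol : ∀ (j : Nat) (mm : List (List String)),
      ((pvMoves m0.length m0 j).map (fun (i : Nat) => ((i : Int), (j : Int)))).foldl
        (moveB (PySem.List.len m0)) mm
      = pvApply m0.length j (pvMoves m0.length m0 j) mm := by
    intro j mm
    rw [PySem.List.len_eq, List.foldl_map]
    exact PySem.List.foldl_congr_mem _ _ (pvMv m0.length j) mm
      (by intro a x _; exact hstep j x a)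
  simp only [move_south_alt, PySem.List.pyGetD_zero]
  rw [PySem.List.len_eq (m0.getD 0 []), pv_pyRange_nat, List.flatMap_map]
  simp only [hinner, pv_foldl_flatMap, hcol, pv_not_isEmpty_flatMap, List.isEmpty_map]
-- ===== VERDICT (by name: the statement is the Claim_ definition above) =====
theorem move_south_spec : Claim_equal_move_south := by
  intro map _ hpre
  unfold Spec_move_south
  have hne := hpre.1
  have hn : 1 ≤ map.length := by
    cases map with
    | nil => exact absurd rfl hne
    | cons a l => simp
  unfold move_south
  rw [PySem.List.pyGetD_zero, PySem.List.len_eq, pv_pyRange_nat, List.foldl_map]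
  rw [outer_inv map (List.range (map.getD 0 []).length) map false
    (List.nodup_range) rfl hn (fun _ _ _ => rfl)]
  rw [alt_eq map]
  simp
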